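-- pv_equiv track=rewrite | github.com/xRobGarcia/Codility | Lesson 5 Prefix Sums/GenomicRangeQuery/GenomicRangeQuery.py | build_nucleotide_prefix_sums
-- ===== SOURCE A (Python) =====
-- def build_nucleotide_prefix_sums(sequence, nucleotides=('A', 'C', 'G', 'T')):
--     """Pure function: Build prefix sums. No side effects."""
--     n = len(sequence)
--     prefix = {nuc: [0] * (n + 1) for nuc in nucleotides}
--
--     for i, nuc in enumerate(sequence):
--         for n in nucleotides:
--             prefix[n][i + 1] = prefix[n][i]
--         prefix[nuc][i + 1] += 1
--
--     return prefix
-- ===== SOURCE B (Python) =====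
-- def build_nucleotide_prefix_sums(sequence, nucleotides=('A', 'C', 'G', 'T')):
--     """Pure function: Build prefix sums. No side effects."""
--     prefix = {}
--     for nuc in nucleotides:
--         counts = [0]
--         running = 0
--         for ch in sequence:
--             if ch == nuc:
--                 running += 1
--             counts.append(running)
--         prefix[nuc] = counts
--     return prefix
-- ===== Notes on version B (the rewrite author's own statement) =====
-- stated objective: simpler
-- what changed: B inverts the loop nesting: for each nucleotide it makes one scan of the sequence with a single running counter, appending to its row, instead of A's single sequence pass that copies all k counts forward in preallocated arrays and bumps one slot.
-- crash fix: On sequences containing a character not listed in nucleotides A raises KeyError (prefix[nuc] lookup); B returns the per-nucleotide prefix arrays, in which such characters simply count for nothing. — e.g. on build_nucleotide_prefix_sums("AXA", ["A", "C"]): A raises KeyError, B returns [("A", [0, 1, 1, 2]), ("C", [0, 0, 0, 0])]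
import Mathlib
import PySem

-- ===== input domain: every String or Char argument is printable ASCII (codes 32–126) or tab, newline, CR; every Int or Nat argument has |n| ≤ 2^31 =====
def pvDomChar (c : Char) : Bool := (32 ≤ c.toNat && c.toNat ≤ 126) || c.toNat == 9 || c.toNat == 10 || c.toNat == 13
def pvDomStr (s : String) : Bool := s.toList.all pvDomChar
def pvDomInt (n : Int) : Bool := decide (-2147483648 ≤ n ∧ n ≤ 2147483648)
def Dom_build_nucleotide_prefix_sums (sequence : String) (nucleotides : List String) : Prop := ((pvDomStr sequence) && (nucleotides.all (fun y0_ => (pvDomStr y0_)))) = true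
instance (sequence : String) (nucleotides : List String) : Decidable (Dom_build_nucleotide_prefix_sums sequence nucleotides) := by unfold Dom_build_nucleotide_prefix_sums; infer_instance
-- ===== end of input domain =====

-- B inverts the loop nesting (one running-counter scan of the sequence per nucleotide, appending to its
-- row) instead of A's single sequence pass copying all counts forward in preallocated arrays; same cost.


-- ===== PORT A =====
-- The loop body of A's 'for i, nuc in enumerate(sequence)' (named so the fold is readable).
-- In-range Python list read/assignment is ported with PySem.List.pyGetD / pySetD.
def pvStepA (nucleotides : List String) (d : PySem.Dict String (List Int)) (p : Int × Char) :
    PySem.Dict String (List Int) :=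
  let i : Int := p.1
  let ch : String := String.ofList [p.2]
  -- for n in nucleotides: prefix[n][i + 1] = prefix[n][i]
  let d1 := nucleotides.foldl
    (fun (d : PySem.Dict String (List Int)) (k : String) =>
      d.insert k (PySem.List.pySetD (d.getD k []) (i + 1) (PySem.List.pyGetD (d.getD k []) i 0))) d
  -- prefix[nuc][i + 1] += 1
  d1.insert ch (PySem.List.pySetD (d1.getD ch []) (i + 1) (PySem.List.pyGetD (d1.getD ch []) (i + 1) 0 + 1))

def build_nucleotide_prefix_sums (sequence : String) (nucleotides : List String) : List (String × List Int) :=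
  let n : Nat := sequence.toList.length
  -- prefix = {nuc: [0] * (n + 1) for nuc in nucleotides}
  let prefix0 : PySem.Dict String (List Int) :=
    nucleotides.foldl (fun d nuc => d.insert nuc (List.replicate (n + 1) (0 : Int))) PySem.Dict.empty
  -- for i, nuc in enumerate(sequence): …
  let prefix1 := (PySem.List.enumerate sequence.toList).foldl (pvStepA nucleotides) prefix0
  prefix1.items

-- ===== PORT B =====
-- counts = [0]; running = 0; for ch in sequence: running += (ch == nuc); counts.append(running)
def pvAltRow (seq : List Char) (nuc : String) : List Int :=
  (seq.foldl
    (fun (acc : List Int × Int) ch =>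
      (acc.1 ++ [if String.ofList [ch] = nuc then acc.2 + 1 else acc.2],
       if String.ofList [ch] = nuc then acc.2 + 1 else acc.2))
    ([0], 0)).1

def build_nucleotide_prefix_sums_alt (sequence : String) (nucleotides : List String) : List (String × List Int) :=
  (nucleotides.foldl
    (fun (d : PySem.Dict String (List Int)) nuc => d.insert nuc (pvAltRow sequence.toList nuc))
    PySem.Dict.empty).items

-- ===== PRECONDITION & SPEC =====
-- Pre_ excludes exactly the sequences containing a character not listed in nucleotides: there the
-- Python A raises KeyError (the prefix[nuc] lookup) and returns nothing.
def Pre_build_nucleotide_prefix_sums (sequence : String) (nucleotides : List String) : Prop :=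
  (sequence.toList.all (fun c => nucleotides.contains (String.ofList [c]))) = true
instance (sequence : String) (nucleotides : List String) : Decidable (Pre_build_nucleotide_prefix_sums sequence nucleotides) := by unfold Pre_build_nucleotide_prefix_sums; infer_instance

def pvWitness_build_nucleotide_prefix_sums : String × List String := ("GATTACA", ["A", "C", "G", "T"])

-- On sequences containing a character not listed in nucleotides A raises KeyError; B returns the
-- per-nucleotide prefix arrays, in which such characters simply count for nothing.
def Raises_build_nucleotide_prefix_sums (sequence : String) (nucleotides : List String) : Prop :=
  (sequence.toList.any (fun c => !(nucleotides.contains (String.ofList [c])))) = true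
instance (sequence : String) (nucleotides : List String) : Decidable (Raises_build_nucleotide_prefix_sums sequence nucleotides) := by unfold Raises_build_nucleotide_prefix_sums; infer_instance
def pvRaiseWitness_build_nucleotide_prefix_sums : String × List String := ("AXA", ["A", "C"])
def pvRaiseWitnessOut_build_nucleotide_prefix_sums : List (String × List Int) :=
  [("A", [0, 1, 1, 2]), ("C", [0, 0, 0, 0])]

def Spec_build_nucleotide_prefix_sums (sequence : String) (nucleotides : List String) (out : List (String × List Int)) : Prop := out = build_nucleotide_prefix_sums_alt sequence nucleotides
instance (sequence : String) (nucleotides : List String) (out : List (String × List Int)) : Decidable (Spec_build_nucleotide_prefix_sums sequence nucleotides out) := by unfold Spec_build_nucleotide_prefix_sums; infer_instance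

-- ===== CLAIM (what is proved, stated in full; the proofs are below) =====
def Claim_equal_build_nucleotide_prefix_sums : Prop := ∀ (sequence : String) (nucleotides : List String), Dom_build_nucleotide_prefix_sums sequence nucleotides → Pre_build_nucleotide_prefix_sums sequence nucleotides → Spec_build_nucleotide_prefix_sums sequence nucleotides (build_nucleotide_prefix_sums sequence nucleotides)

def Claim_raises_build_nucleotide_prefix_sums : Prop := (∀ (sequence : String) (nucleotides : List String), Dom_build_nucleotide_prefix_sums sequence nucleotides → Raises_build_nucleotide_prefix_sums sequence nucleotides → ¬ Pre_build_nucleotide_prefix_sums sequence nucleotides) ∧ (Dom_build_nucleotide_prefix_sums (pvRaiseWitness_build_nucleotide_prefix_sums.1) (pvRaiseWitness_build_nucleotide_prefix_sums.2) ∧ Raises_build_nucleotide_prefix_sums (pvRaiseWitness_build_nucleotide_prefix_sums.1) (pvRaiseWitness_build_nucleotide_prefix_sums.2) ∧ build_nucleotide_prefix_sums_alt (pvRaiseWitness_build_nucleotide_prefix_sums.1) (pvRaiseWitness_build_nucleotide_prefix_sums.2) = pvRaiseWitnessOut_build_nucleotide_prefix_sums)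

-- ===== LEMMAS AND PROOFS =====

-- "this sequence character counts for nucleotide k"
def pvP (k : String) : Char → Bool := fun x => decide (String.ofList [x] = k)

-- The true prefix-count row: entry j is how many of the first j characters match k.
def pvRow (s : List Char) (k : String) : List Int :=
  (List.range (s.length + 1)).map (fun j => ((s.take j).countP (pvP k) : Int))

lemma pvRow_nil (k : String) : pvRow [] k = [0] := by
  simp [pvRow]

lemma pvRow_length (s : List Char) (k : String) : (pvRow s k).length = s.length + 1 := by
  simp [pvRow]

lemma pv_count_append (t : List Char) (c : Char) (k : String) :
    ((t ++ [c]).countP (pvP k) : Int)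
      = (t.countP (pvP k) : Int) + (if String.ofList [c] = k then 1 else 0) := by
  by_cases h : String.ofList [c] = k <;>
    simp [List.countP_append, pvP, h]

lemma pvRow_append_singleton (t : List Char) (c : Char) (k : String) :
    pvRow (t ++ [c]) k = pvRow t k ++ [((t ++ [c]).countP (pvP k) : Int)] := by
  unfold pvRow
  rw [show (t ++ [c]).length = t.length + 1 by simp]
  rw [List.range_succ, List.map_append]
  congr 1
  · apply List.map_congr_left
    intro j hj
    simp only [List.mem_range] at hj
    rw [List.take_append_of_le_length (by omega)]
  · have h : List.take (t.length + 1) (t ++ [c]) = t ++ [c] := by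
      apply List.take_of_length_le; simp
    simp [h]

lemma pvAltRow_aux (k : String) :
    ∀ (s t : List Char),
      s.foldl
        (fun (acc : List Int × Int) ch =>
          (acc.1 ++ [if String.ofList [ch] = k then acc.2 + 1 else acc.2],
           if String.ofList [ch] = k then acc.2 + 1 else acc.2))
        (pvRow t k, (t.countP (pvP k) : Int))
      = (pvRow (t ++ s) k, ((t ++ s).countP (pvP k) : Int)) := by
  intro s
  induction s with
  | nil => intro t; simp
  | cons c s' ih =>
    intro t
    rw [List.foldl_cons]
    have hrun : (if String.ofList [c] = k then (t.countP (pvP k) : Int) + 1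
        else (t.countP (pvP k) : Int)) = ((t ++ [c]).countP (pvP k) : Int) := by
      rw [pv_count_append]
      by_cases h : String.ofList [c] = k <;> simp [h]
    have hstep : (pvRow t k ++ [if String.ofList [c] = k then (t.countP (pvP k) : Int) + 1
          else (t.countP (pvP k) : Int)],
        (if String.ofList [c] = k then (t.countP (pvP k) : Int) + 1
          else (t.countP (pvP k) : Int)))
        = (pvRow (t ++ [c]) k, ((t ++ [c]).countP (pvP k) : Int)) := by
      rw [hrun, pvRow_append_singleton]
    rw [hstep]
    have := ih (t ++ [c])
    simpa using this

lemma pvAltRow_eq_pvRow (s : List Char) (k : String) : pvAltRow s k = pvRow s k := by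
  have h := pvAltRow_aux k s []
  rw [pvRow_nil] at h
  simp only [List.countP_nil, Nat.cast_zero, List.nil_append] at h
  unfold pvAltRow
  rw [h]

-- getD through a fold that inserts a value depending only on the key.
lemma pvGetD_foldl_insert_fun (v : String → List Int) :
    ∀ (l : List String) (d : PySem.Dict String (List Int)) (k : String),
      (l.foldl (fun d x => d.insert x (v x)) d).getD k []
        = if k ∈ l then v k else d.getD k [] := by
  intro l
  induction l with
  | nil => intro d k; simp
  | cons a l' ih =>
    intro d k
    rw [List.foldl_cons, ih]
    by_cases h1 : k ∈ l'
    · simp [h1]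
    · by_cases h2 : k = a <;> simp [h1, h2, PySem.Dict.getD_insert]

-- getD through a fold that rewrites each listed key with g of its current value (g idempotent).
lemma pvGetD_foldl_insert_self_fun (g : List Int → List Int) (hg : ∀ x, g (g x) = g x) :
    ∀ (l : List String) (d : PySem.Dict String (List Int)) (k : String),
      (l.foldl (fun d x => d.insert x (g (d.getD x []))) d).getD k []
        = if k ∈ l then g (d.getD k []) else d.getD k [] := by
  intro l
  induction l with
  | nil => intro d k; simp
  | cons a l' ih =>
    intro d k
    rw [List.foldl_cons, ih]
    by_cases h1 : k ∈ l'
    · by_cases h2 : k = a <;> simp [h1, h2, PySem.Dict.getD_insert, hg]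
    · by_cases h2 : k = a <;> simp [h1, h2, PySem.Dict.getD_insert, hg]

lemma pvSet_update_self :
    ∀ (l : List String) (s : PySem.Set String), (∀ x ∈ l, x ∈ s) → PySem.Set.update s l = s := by
  intro l
  induction l with
  | nil => intro s _; rfl
  | cons a l' ih =>
    intro s h
    have ha : a ∈ s := h a (List.mem_cons_self)
    have hadd : PySem.Set.add s a = s := by
      simp [PySem.Set.add, PySem.Set.contains, ha]
    calc PySem.Set.update s (a :: l') = PySem.Set.update (PySem.Set.add s a) l' := rfl
      _ = PySem.Set.update s l' := by rw [hadd]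
      _ = s := ih s (fun x hx => h x (List.mem_cons_of_mem _ hx))

lemma pvRow_getD_len (t : List Char) (k : String) :
    (pvRow t k).getD t.length 0 = (t.countP (pvP k) : Int) := by
  have h1 : t.length < (pvRow t k).length := by rw [pvRow_length]; omega
  rw [List.getD_eq_getElem?_getD, List.getElem?_eq_getElem h1]
  simp [pvRow]

-- what A's inner copy-forward step does to a row that is filled up to slot (t.length) only
lemma pvG_row (t : List Char) (k : String) (m : Nat) :
    PySem.List.pySetD (pvRow t k ++ List.replicate (m + 1) (0 : Int)) ((t.length : Int) + 1)
        (PySem.List.pyGetD (pvRow t k ++ List.replicate (m + 1) (0 : Int)) (t.length : Int) 0)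
      = pvRow t k ++ (t.countP (pvP k) : Int) :: List.replicate m 0 := by
  have hc : ((t.length : Int) + 1) = (((t.length + 1 : Nat)) : Int) := by push_cast; ring
  rw [hc, PySem.List.pySetD_natCast, PySem.List.pyGetD_natCast]
  rw [List.getD_append _ _ _ _ (by rw [pvRow_length]; omega), pvRow_getD_len]
  rw [List.set_append_right _ _ (pvRow_length t k).le]
  simp [pvRow_length, List.replicate_succ]

lemma pvG_idem (i0 : Nat) (v : List Int) :
    PySem.List.pySetD (PySem.List.pySetD v ((i0 : Int) + 1) (PySem.List.pyGetD v (i0 : Int) 0))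
        ((i0 : Int) + 1)
        (PySem.List.pyGetD (PySem.List.pySetD v ((i0 : Int) + 1) (PySem.List.pyGetD v (i0 : Int) 0))
          (i0 : Int) 0)
      = PySem.List.pySetD v ((i0 : Int) + 1) (PySem.List.pyGetD v (i0 : Int) 0) := by
  have hc : ((i0 : Int) + 1) = (((i0 + 1 : Nat)) : Int) := by push_cast; ring
  rw [hc]
  simp only [PySem.List.pySetD_natCast, PySem.List.pyGetD_natCast]
  have hgs : ∀ w : Int, (v.set (i0 + 1) w).getD i0 0 = v.getD i0 0 := by
    intro w
    rw [List.getD_eq_getElem?_getD, List.getElem?_set_ne (by omega), ← List.getD_eq_getElem?_getD]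
  rw [hgs, List.set_set]

lemma pvCh_get (t : List Char) (k : String) (m : Nat) (cc : Int) :
    PySem.List.pyGetD (pvRow t k ++ cc :: List.replicate m 0) ((t.length : Int) + 1) 0 = cc := by
  have hc : ((t.length : Int) + 1) = (((t.length + 1 : Nat)) : Int) := by push_cast; ring
  rw [hc, PySem.List.pyGetD_natCast]
  rw [List.getD_append_right _ _ _ _ (pvRow_length t k).le]
  simp [pvRow_length]

lemma pvCh_set (t : List Char) (k : String) (m : Nat) (cc w : Int) :
    PySem.List.pySetD (pvRow t k ++ cc :: List.replicate m 0) ((t.length : Int) + 1) w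
      = pvRow t k ++ w :: List.replicate m 0 := by
  have hc : ((t.length : Int) + 1) = (((t.length + 1 : Nat)) : Int) := by push_cast; ring
  rw [hc, PySem.List.pySetD_natCast]
  rw [List.set_append_right _ _ (pvRow_length t k).le]
  simp [pvRow_length]

-- A's loop invariant: after the entries of t have been processed, every row is the true prefix row
-- of t followed by the untouched zeros.
lemma pvA_loop (nucleotides : List String) :
    ∀ (s t : List Char) (d : PySem.Dict String (List Int)),
      (∀ c ∈ s, String.ofList [c] ∈ nucleotides) →
      (∀ k, d.getD k [] = if k ∈ nucleotides then pvRow t k ++ List.replicate s.length (0 : Int) else []) →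
      d.keys = PySem.Set.ofList nucleotides →
      (∀ k, ((PySem.List.enumerate s (t.length : Int)).foldl (pvStepA nucleotides) d).getD k []
          = if k ∈ nucleotides then pvRow (t ++ s) k else []) ∧
      ((PySem.List.enumerate s (t.length : Int)).foldl (pvStepA nucleotides) d).keys
          = PySem.Set.ofList nucleotides := by
  intro s
  induction s with
  | nil =>
    intro t d _ hd hk
    refine ⟨fun k => ?_, by simpa [PySem.List.enumerate] using hk⟩
    simp only [PySem.List.enumerate, List.foldl_nil] at *
    simpa using hd k
  | cons c s' ih =>
    intro t d hpre hd hk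
    rw [PySem.List.enumerate_cons, List.foldl_cons]
    have hch : String.ofList [c] ∈ nucleotides := hpre c List.mem_cons_self
    -- the inner copy-forward fold
    have hd1 : ∀ k, (nucleotides.foldl
        (fun (d : PySem.Dict String (List Int)) (k : String) =>
          d.insert k (PySem.List.pySetD (d.getD k []) ((t.length : Int) + 1)
            (PySem.List.pyGetD (d.getD k []) (t.length : Int) 0))) d).getD k []
        = if k ∈ nucleotides then pvRow t k ++ (t.countP (pvP k) : Int) :: List.replicate s'.length 0
          else [] := by
      intro k
      rw [pvGetD_foldl_insert_self_fun
        (fun v => PySem.List.pySetD v ((t.length : Int) + 1) (PySem.List.pyGetD v (t.length : Int) 0))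
        (pvG_idem t.length)]
      by_cases hm : k ∈ nucleotides
      · rw [if_pos hm, if_pos hm, hd k, if_pos hm]
        simp only [List.length_cons]
        exact pvG_row t k s'.length
      · rw [if_neg hm, if_neg hm, hd k, if_neg hm]
    have hk1 : (nucleotides.foldl
        (fun (d : PySem.Dict String (List Int)) (k : String) =>
          d.insert k (PySem.List.pySetD (d.getD k []) ((t.length : Int) + 1)
            (PySem.List.pyGetD (d.getD k []) (t.length : Int) 0))) d).keys
        = PySem.Set.ofList nucleotides := by
      rw [PySem.Dict.keys_foldl_insert, hk]
      exact pvSet_update_self nucleotides _ (fun x hx => (PySem.Set.mem_ofList _ _).mpr hx)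
    -- the step as a whole
    have hmid_getD : ∀ k, (pvStepA nucleotides d ((t.length : Int), c)).getD k []
        = if k ∈ nucleotides then pvRow (t ++ [c]) k ++ List.replicate s'.length (0 : Int)
          else [] := by
      intro k
      unfold pvStepA
      simp only []
      rw [PySem.Dict.getD_insert]
      rw [hd1 (String.ofList [c]), if_pos hch, pvCh_get, pvCh_set]
      by_cases hkc : k = String.ofList [c]
      · rw [if_pos hkc, hkc, if_pos hch, pvRow_append_singleton, pv_count_append, if_pos rfl]
        simp
      · rw [if_neg hkc, hd1 k]
        by_cases hm : k ∈ nucleotides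
        · rw [if_pos hm, if_pos hm, pvRow_append_singleton, pv_count_append,
            if_neg (fun h => hkc h.symm)]
          simp
        · simp [hm]
    have hmid_keys : (pvStepA nucleotides d ((t.length : Int), c)).keys
        = PySem.Set.ofList nucleotides := by
      unfold pvStepA
      simp only []
      rw [PySem.Dict.keys_insert_of_contains]
      · exact hk1
      · rw [PySem.Dict.contains_iff_mem_keys, hk1]
        exact (PySem.Set.mem_ofList _ _).mpr hch
    have hpre' : ∀ x ∈ s', String.ofList [x] ∈ nucleotides :=
      fun x hx => hpre x (List.mem_cons_of_mem _ hx)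
    have hinv : ∀ k, (pvStepA nucleotides d ((t.length : Int), c)).getD k []
        = if k ∈ nucleotides then pvRow (t ++ [c]) k ++ List.replicate s'.length (0 : Int)
          else [] := hmid_getD
    have := ih (t ++ [c]) (pvStepA nucleotides d ((t.length : Int), c)) hpre' hinv hmid_keys
    rw [show (((t ++ [c]).length : Nat) : Int) = (t.length : Int) + 1 by simp] at this
    rw [show (t ++ [c]) ++ s' = t ++ c :: s' by simp] at this
    exact this

theorem pv_main (sequence : String) (nucleotides : List String)
    (hpre : Pre_build_nucleotide_prefix_sums sequence nucleotides) :
    build_nucleotide_prefix_sums sequence nucleotides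
      = build_nucleotide_prefix_sums_alt sequence nucleotides := by
  have hpre' : ∀ c ∈ sequence.toList, String.ofList [c] ∈ nucleotides := by
    intro c hc
    have h := List.all_eq_true.mp hpre c hc
    simpa using h
  unfold build_nucleotide_prefix_sums build_nucleotide_prefix_sums_alt
  simp only []
  -- A's initial dict
  have hd0 : ∀ k, (nucleotides.foldl
      (fun (d : PySem.Dict String (List Int)) nuc =>
        d.insert nuc (List.replicate (sequence.toList.length + 1) (0 : Int)))
      PySem.Dict.empty).getD k []
      = if k ∈ nucleotides then pvRow [] k ++ List.replicate sequence.toList.length (0 : Int)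
        else [] := by
    intro k
    rw [pvGetD_foldl_insert_fun (fun _ => List.replicate (sequence.toList.length + 1) (0 : Int))]
    by_cases h : k ∈ nucleotides <;> simp [h, pvRow_nil, List.replicate_succ]
  have hk0 : (nucleotides.foldl
      (fun (d : PySem.Dict String (List Int)) nuc =>
        d.insert nuc (List.replicate (sequence.toList.length + 1) (0 : Int)))
      PySem.Dict.empty).keys = PySem.Set.ofList nucleotides := by
    rw [PySem.Dict.keys_foldl_insert
      (f := fun _ _ => List.replicate (sequence.toList.length + 1) (0 : Int)),
      PySem.Dict.keys_empty]
    rfl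
  have hmain := pvA_loop nucleotides sequence.toList [] _ hpre'
    (by simpa using hd0) hk0
  simp only [List.length_nil, Nat.cast_zero, List.nil_append] at hmain
  -- B's dict
  have hdb : ∀ k, (nucleotides.foldl
      (fun (d : PySem.Dict String (List Int)) nuc => d.insert nuc (pvAltRow sequence.toList nuc))
      PySem.Dict.empty).getD k []
      = if k ∈ nucleotides then pvAltRow sequence.toList k else [] := by
    intro k
    rw [pvGetD_foldl_insert_fun (fun nuc => pvAltRow sequence.toList nuc)]
    by_cases h : k ∈ nucleotides <;> simp [h]
  have hkb : (nucleotides.foldl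
      (fun (d : PySem.Dict String (List Int)) nuc => d.insert nuc (pvAltRow sequence.toList nuc))
      PySem.Dict.empty).keys = PySem.Set.ofList nucleotides := by
    rw [PySem.Dict.keys_foldl_insert (f := fun _ nuc => pvAltRow sequence.toList nuc),
      PySem.Dict.keys_empty]
    rfl
  -- items equality
  rw [PySem.Dict.items_eq_map_keys _ (by rw [hmain.2]; exact PySem.Set.nodup_ofList _) ([] : List Int),
    PySem.Dict.items_eq_map_keys _ (by rw [hkb]; exact PySem.Set.nodup_ofList _) ([] : List Int)]
  rw [hmain.2, hkb]
  apply List.map_congr_left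
  intro k hkmem
  have hkn : k ∈ nucleotides := (PySem.Set.mem_ofList _ _).mp hkmem
  rw [hmain.1 k, hdb k, if_pos hkn, if_pos hkn, pvAltRow_eq_pvRow]

-- ===== VERDICT (by name: the statement is the Claim_ definition above) =====
theorem build_nucleotide_prefix_sums_spec : Claim_equal_build_nucleotide_prefix_sums := by
  intro sequence nucleotides _ hpre
  unfold Spec_build_nucleotide_prefix_sums
  exact pv_main sequence nucleotides hpre

set_option maxRecDepth 8192 in
@[simp]
theorem build_nucleotide_prefix_sums_raises : Claim_raises_build_nucleotide_prefix_sums := by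
  unfold Claim_raises_build_nucleotide_prefix_sums
  refine ⟨?_, by decide, by decide, by rfl⟩
  rintro s nucl _ hr hpre
  obtain ⟨c, hc, hnc⟩ := List.any_eq_true.mp hr
  have hm := List.all_eq_true.mp hpre c hc
  rw [hm] at hnc
  simp at hnc
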